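-- pv_equiv track=rewrite | github.com/thechupa55/CP | app.py | _find_default_index
-- ===== SOURCE A (Python) =====
-- def _normalize_col(name: str) -> str:
--     return str(name).strip().casefold()
--
-- def _find_default_index(options: list[str], default_name: str) -> int:
--     if not options:
--         return 0
--     target = _normalize_col(default_name)
--     normalized = [_normalize_col(o) for o in options]
--     if target in normalized:
--         return normalized.index(target)
--     for i, n in enumerate(normalized):
--         if n.startswith(target + "__"):
--             return i
--     for i, n in enumerate(normalized):
--         if target in n:
--             return i
--     return 0
-- ===== SOURCE B (Python) =====
-- def _find_default_index(options: list[str], default_name: str) -> int: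
--     target = str(default_name).strip().casefold()
--     prefix = target + "__"
--     best_tier = 4
--     best_idx = 0
--     for i, o in enumerate(options):
--         n = str(o).strip().casefold()
--         if n == target:
--             tier = 1
--         elif n.startswith(prefix):
--             tier = 2
--         elif target in n:
--             tier = 3
--         else:
--             tier = 4
--         if tier < best_tier:
--             best_tier = tier
--             best_idx = i
--     return best_idx
-- ===== Notes on version B (the rewrite author's own statement) =====
-- stated objective: faster
-- what changed: A normalizes the list and then makes up to three sequential scans plus a membership test/index pass (exact match, '__'-prefix match, substring match); B classifies each option into a tier (1 exact, 2 '__'-prefix, 3 substring, 4 none) in one single pass, tracking the best (tier, index) pair seen so far, first occurrence of the lowest tier winning.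
import Mathlib
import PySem

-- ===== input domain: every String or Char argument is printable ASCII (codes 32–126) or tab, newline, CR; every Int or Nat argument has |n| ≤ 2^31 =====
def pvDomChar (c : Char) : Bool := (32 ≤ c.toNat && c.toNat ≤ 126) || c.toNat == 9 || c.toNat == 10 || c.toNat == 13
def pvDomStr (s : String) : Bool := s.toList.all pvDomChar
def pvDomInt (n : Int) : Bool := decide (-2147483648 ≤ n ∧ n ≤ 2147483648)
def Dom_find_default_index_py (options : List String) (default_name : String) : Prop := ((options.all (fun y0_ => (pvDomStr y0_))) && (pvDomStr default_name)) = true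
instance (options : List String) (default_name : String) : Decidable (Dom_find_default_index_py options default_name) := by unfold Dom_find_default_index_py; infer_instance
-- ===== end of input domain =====

-- B replaces A's up-to-three sequential scans of the normalized list by one single pass
-- tracking the best (tier, index) seen so far; objective: alternative decomposition.
-- ('casefold' is ported as lower: the two coincide on the ASCII strings of Dom_.)

-- ===== PORT A =====
def pvNormalizeCol (name : String) : String :=
  PySem.Str.lower (PySem.Str.strip name)

def find_default_index_py (options : List String) (default_name : String) : Int :=
  if options = [] then 0
  else
    let target := pvNormalizeCol default_name
    let normalized := options.map pvNormalizeCol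
    match PySem.List.index? normalized target with
    | some k => (k : Int)
    | none =>
      match normalized.findIdx? (fun n => PySem.Str.startswith n (target ++ "__")) with
      | some i => (i : Int)
      | none =>
        match normalized.findIdx? (fun n => PySem.Str.isIn target n) with
        | some i => (i : Int)
        | none => 0

-- ===== PORT B =====
def pvNormB (name : String) : String :=
  PySem.Str.lower (PySem.Str.strip name)

def pvTier (target n : String) : Nat :=
  if n == target then 1
  else if PySem.Str.startswith n (target ++ "__") then 2
  else if PySem.Str.isIn target n then 3
  else 4

def find_default_index_py_alt (options : List String) (default_name : String) : Int :=
  let target := pvNormB default_name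
  let best := (PySem.List.enumerate options).foldl
    (fun (best : Nat × Int) p =>
      let tier := pvTier target (pvNormB p.2)
      if tier < best.1 then (tier, p.1) else best)
    (4, 0)
  best.2

-- ===== PRECONDITION & SPEC =====
def Spec_find_default_index_py (options : List String) (default_name : String) (out : Int) : Prop := out = find_default_index_py_alt options default_name
instance (options : List String) (default_name : String) (out : Int) : Decidable (Spec_find_default_index_py options default_name out) := by unfold Spec_find_default_index_py; infer_instance

-- ===== CLAIM (what is proved, stated in full; the proofs are below) =====
def Claim_equal_find_default_index_py : Prop := ∀ (options : List String) (default_name : String), Dom_find_default_index_py options default_name → Spec_find_default_index_py options default_name (find_default_index_py options default_name)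

-- ===== LEMMAS AND PROOFS =====

-- tier of an option string, best (smallest) tier of a list, first index at a given tier
def pvTf (t o : String) : Nat := pvTier t (pvNormB o)
def pvBt (t : String) (l : List String) : Nat := l.foldr (fun o r => min (pvTf t o) r) 4
def pvFi (t : String) (k : Nat) (l : List String) : Nat := l.findIdx (fun o => pvTf t o == k)

theorem pvNorm_eq : pvNormalizeCol = pvNormB := rfl

theorem pvTf_def (t o : String) : pvTier t (pvNormB o) = pvTf t o := rfl

theorem pvBt_nil (t : String) : pvBt t [] = 4 := rfl

theorem pvBt_cons (t x : String) (l : List String) :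
    pvBt t (x :: l) = min (pvTf t x) (pvBt t l) := rfl

theorem pvTf_cases (t o : String) : pvTf t o = 1 ∨ pvTf t o = 2 ∨ pvTf t o = 3 ∨ pvTf t o = 4 := by
  unfold pvTf pvTier; split_ifs <;> simp

theorem pvBt_le_four (t : String) (l : List String) : pvBt t l ≤ 4 := by
  induction l with
  | nil => simp [pvBt_nil]
  | cons x l ih => rw [pvBt_cons, Nat.min_def]; split_ifs; omega; omega

theorem pvBt_one_le (t : String) (l : List String) : 1 ≤ pvBt t l := by
  induction l with
  | nil => simp [pvBt_nil]
  | cons x l ih =>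
    have := pvTf_cases t x
    rw [pvBt_cons, Nat.min_def]; split_ifs; omega; omega

theorem pvBt_le_tf (t : String) {l : List String} {x : String} (hx : x ∈ l) :
    pvBt t l ≤ pvTf t x := by
  induction l with
  | nil => simp at hx
  | cons y l ih =>
    rcases List.mem_cons.mp hx with h | h
    · subst h; rw [pvBt_cons, Nat.min_def]; split_ifs; omega; omega
    · have := ih h; rw [pvBt_cons, Nat.min_def]; split_ifs; omega; omega

theorem pvBt_mem (t : String) (l : List String) :
    pvBt t l = 4 ∨ ∃ x ∈ l, pvTf t x = pvBt t l := by
  induction l with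
  | nil => simp [pvBt_nil]
  | cons y l ih =>
    by_cases hy : pvTf t y ≤ pvBt t l
    · right
      refine ⟨y, List.mem_cons_self, ?_⟩
      rw [pvBt_cons, Nat.min_def]; split_ifs; omega
    · have hbt : pvBt t (y :: l) = pvBt t l := by
        rw [pvBt_cons, Nat.min_def]; split_ifs; omega
      rcases ih with h | ⟨x, hx, hfx⟩
      · left; omega
      · right; exact ⟨x, List.mem_cons_of_mem _ hx, by omega⟩

-- string facts: an exact match is not a '__'-prefix match but is a substring match;
-- a '__'-prefix match is a substring match
theorem pvSw_self_false (tl : List Char) : PySem.Chars.startswith tl (tl ++ ['_', '_']) = false := by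
  rw [Bool.eq_false_iff]
  intro h
  have h2 := ((PySem.Chars.startswith_iff _ _).mp h).length_le
  simp at h2

theorem pvIsIn_self (tl : List Char) : PySem.Chars.isIn tl tl = true :=
  (PySem.Chars.isIn_iff_infix _ _).mpr List.infix_rfl

theorem pvIsIn_of_sw (tl nl : List Char) (h : PySem.Chars.startswith nl (tl ++ ['_', '_']) = true) :
    PySem.Chars.isIn tl nl = true :=
  (PySem.Chars.isIn_iff_infix _ _).mpr
    (((List.prefix_append _ _).trans ((PySem.Chars.startswith_iff _ _).mp h)).isInfix)

-- the three tests A scans for, written as tier tests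
theorem pvQ1 (t o : String) : (pvNormB o == t) = (pvTf t o == 1) := by
  unfold pvTf pvTier; split_ifs with h1 h2 h3 <;> simp_all

theorem pvQ2 (t o : String) :
    PySem.Str.startswith (pvNormB o) (t ++ "__") = (pvTf t o == 2) := by
  unfold pvTf pvTier
  split_ifs with h1 h2 h3 <;> simp_all
  exact pvSw_self_false t.toList

theorem pvQ3 (t o : String) :
    PySem.Str.isIn t (pvNormB o) = decide (pvTf t o ≤ 3) := by
  unfold pvTf pvTier
  split_ifs with h1 h2 h3 <;> simp_all
  · exact pvIsIn_self t.toList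
  · exact pvIsIn_of_sw _ _ h2

theorem pvFind?_pos {α : Type} {p : α → Bool} {l : List α} (h : ∃ x ∈ l, p x = true) :
    List.findIdx? p l = some (List.findIdx p l) :=
  List.findIdx?_eq_some_iff_findIdx_eq.mpr ⟨List.findIdx_lt_length_of_exists h, rfl⟩

theorem pvFindIdx_congr {α : Type} {p q : α → Bool} {l : List α}
    (h : ∀ x ∈ l, p x = q x) : List.findIdx p l = List.findIdx q l := by
  induction l with
  | nil => rfl
  | cons y l ih =>
    rw [List.findIdx_cons, List.findIdx_cons, h y List.mem_cons_self,
      ih (fun x hx => h x (List.mem_cons_of_mem _ hx))]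

-- B's single pass: the fold computes the best tier and the first index achieving it
theorem pvFold_enum (t : String) (l : List String) (s : Int) (b : Nat) (j : Int)
    (hb : b ≤ 4) :
    (PySem.List.enumerate l s).foldl
      (fun (best : Nat × Int) p =>
        if pvTier t (pvNormB p.2) < best.1 then (pvTier t (pvNormB p.2), p.1) else best) (b, j)
    = if b ≤ pvBt t l then (b, j)
      else (pvBt t l, s + (pvFi t (pvBt t l) l : Int)) := by
  induction l generalizing s b j with
  | nil => rw [PySem.List.enumerate_nil]; simp [pvBt_nil, hb]
  | cons x l ih =>
    rw [PySem.List.enumerate_cons, List.foldl_cons]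
    dsimp only
    simp only [pvTf_def] at ih ⊢
    have h4 := pvBt_le_four t l
    by_cases hx : pvTf t x < b
    · rw [if_pos hx, ih _ _ _ (by have := pvTf_cases t x; omega)]
      by_cases hle : pvTf t x ≤ pvBt t l
      · rw [if_pos hle]
        have hbc : pvBt t (x :: l) = pvTf t x := by
          rw [pvBt_cons, Nat.min_def]; split_ifs; omega
        rw [if_neg (by omega), hbc]
        have hfi : pvFi t (pvTf t x) (x :: l) = 0 := by
          unfold pvFi
          rw [List.findIdx_cons]; simp
        rw [hfi]; simp
      · rw [if_neg hle]
        have hbc : pvBt t (x :: l) = pvBt t l := by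
          rw [pvBt_cons, Nat.min_def]; split_ifs; omega
        rw [if_neg (by omega), hbc]
        have hfi : pvFi t (pvBt t l) (x :: l) = pvFi t (pvBt t l) l + 1 := by
          unfold pvFi
          rw [List.findIdx_cons]
          have hne : (pvTf t x == pvBt t l) = false := by
            simp; omega
          rw [hne]; rfl
        rw [hfi]
        refine congrArg _ ?_
        push_cast; ring
    · rw [if_neg hx, ih _ _ _ hb]
      by_cases hle : b ≤ pvBt t l
      · rw [if_pos hle, if_pos]
        rw [pvBt_cons, Nat.min_def]; split_ifs; omega; omega
      · rw [if_neg hle]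
        have hbc : pvBt t (x :: l) = pvBt t l := by
          rw [pvBt_cons, Nat.min_def]; split_ifs; omega; omega
        rw [if_neg (by omega), hbc]
        have hfi : pvFi t (pvBt t l) (x :: l) = pvFi t (pvBt t l) l + 1 := by
          unfold pvFi
          rw [List.findIdx_cons]
          have hne : (pvTf t x == pvBt t l) = false := by
            simp; omega
          rw [hne]; rfl
        rw [hfi]
        refine congrArg _ ?_
        push_cast; ring

-- A's three sequential scans equal the same best-tier description
theorem pvChain_eq (t : String) (l : List String) :
    (match PySem.List.index? (l.map pvNormB) t with
     | some k => (k : Int)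
     | none =>
       match (l.map pvNormB).findIdx? (fun n => PySem.Str.startswith n (t ++ "__")) with
       | some i => (i : Int)
       | none =>
         match (l.map pvNormB).findIdx? (fun n => PySem.Str.isIn t n) with
         | some i => (i : Int)
         | none => 0)
    = if pvBt t l = 4 then 0 else (pvFi t (pvBt t l) l : Int) := by
  have hidx : PySem.List.index? (l.map pvNormB) t
      = List.findIdx? (fun o => pvTf t o == 1) l := by
    rw [show PySem.List.index? (l.map pvNormB) t
        = List.findIdx? (fun n => n == t) (l.map pvNormB) from by
      simp [PySem.List.index?_eq_idxOf?, List.idxOf?]]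
    rw [List.findIdx?_map]
    simp only [Function.comp_def, pvQ1]
  have hsw : (l.map pvNormB).findIdx? (fun n => PySem.Str.startswith n (t ++ "__"))
      = List.findIdx? (fun o => pvTf t o == 2) l := by
    rw [List.findIdx?_map]
    simp only [Function.comp_def, pvQ2]
  have hin : (l.map pvNormB).findIdx? (fun n => PySem.Str.isIn t n)
      = List.findIdx? (fun o => decide (pvTf t o ≤ 3)) l := by
    rw [List.findIdx?_map]
    simp only [Function.comp_def, pvQ3]
  rw [hidx, hsw, hin]
  have h1 := pvBt_one_le t l
  have h4 := pvBt_le_four t l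
  have hcases : pvBt t l = 1 ∨ pvBt t l = 2 ∨ pvBt t l = 3 ∨ pvBt t l = 4 := by omega
  rcases hcases with hb | hb | hb | hb
  · rcases pvBt_mem t l with h | ⟨x, hx, hfx⟩
    · omega
    · rw [pvFind?_pos ⟨x, hx, by simp [hfx, hb]⟩]
      rw [hb]; simp [pvFi]
  · have hn1 : List.findIdx? (fun o => pvTf t o == 1) l = none :=
      List.findIdx?_eq_none_iff.mpr fun x hx => by
        have := pvBt_le_tf t hx; simp; omega
    rcases pvBt_mem t l with h | ⟨x, hx, hfx⟩
    · omega
    · rw [hn1, pvFind?_pos ⟨x, hx, by simp [hfx, hb]⟩]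
      rw [hb]; simp [pvFi]
  · have hn1 : List.findIdx? (fun o => pvTf t o == 1) l = none :=
      List.findIdx?_eq_none_iff.mpr fun x hx => by
        have := pvBt_le_tf t hx; simp; omega
    have hn2 : List.findIdx? (fun o => pvTf t o == 2) l = none :=
      List.findIdx?_eq_none_iff.mpr fun x hx => by
        have := pvBt_le_tf t hx; simp; omega
    rcases pvBt_mem t l with h | ⟨x, hx, hfx⟩
    · omega
    · rw [hn1, hn2, pvFind?_pos ⟨x, hx, by simp [hfx, hb]⟩]
      have hcg : List.findIdx (fun o => decide (pvTf t o ≤ 3)) l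
          = List.findIdx (fun o => pvTf t o == 3) l :=
        pvFindIdx_congr fun x hx => by
          have h1 := pvBt_le_tf t hx
          rw [hb] at h1
          rcases pvTf_cases t x with h | h | h | h
          · exfalso; omega
          · exfalso; omega
          · rw [h]; decide
          · rw [h]; decide
      rw [hb]; simp [pvFi, hcg]
  · have hn1 : List.findIdx? (fun o => pvTf t o == 1) l = none :=
      List.findIdx?_eq_none_iff.mpr fun x hx => by
        have := pvBt_le_tf t hx; simp; omega
    have hn2 : List.findIdx? (fun o => pvTf t o == 2) l = none :=
      List.findIdx?_eq_none_iff.mpr fun x hx => by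
        have := pvBt_le_tf t hx; simp; omega
    have hn3 : List.findIdx? (fun o => decide (pvTf t o ≤ 3)) l = none :=
      List.findIdx?_eq_none_iff.mpr fun x hx => by
        have := pvBt_le_tf t hx; simp; omega
    rw [hn1, hn2, hn3, hb]; simp

-- ===== VERDICT (by name: the statement is the Claim_ definition above) =====
theorem find_default_index_py_spec : Claim_equal_find_default_index_py := by
  intro options dn _
  unfold Spec_find_default_index_py
  simp only [find_default_index_py, find_default_index_py_alt, pvNorm_eq]
  rw [pvFold_enum (pvNormB dn) options 0 4 0 (le_refl 4)]
  by_cases h : options = []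
  · subst h
    simp [pvBt_nil]
  · rw [if_neg h, pvChain_eq (pvNormB dn) options]
    have h4 := pvBt_le_four (pvNormB dn) options
    by_cases hb : pvBt (pvNormB dn) options = 4
    · rw [if_pos hb, if_pos (by omega)]
    · rw [if_neg hb, if_neg (by omega)]
      simp
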